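-- pv_equiv track=rewrite | github.com/alanzavalamx/Python | game.py | winnerWays
-- ===== SOURCE A (Python) =====
-- winPos = ((1,2,3), (4,5,6), (7,8,9), (1,4,7), (2,5,8), (3,6,9), (1,5,9), (3,5,7))
--
-- def winnerWays(pass_movements):
--     #REVISA SI ALGUIEN GANO
--     for subset in winPos:
--         count = 0
--         for movements in pass_movements:
--             if movements in subset:
--                 count += 1
--         if count == 3:
--             return True
--     return False
-- ===== SOURCE B (Python) =====
-- winPos = ((1,2,3), (4,5,6), (7,8,9), (1,4,7), (2,5,8), (3,6,9), (1,5,9), (3,5,7))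
--
-- _CELL_TRIPLES = {}
-- for _i, _triple in enumerate(winPos):
--     for _cell in _triple:
--         _CELL_TRIPLES.setdefault(_cell, []).append(_i)
--
-- def winnerWays(pass_movements):
--     counts = [0] * 8
--     for m in pass_movements:
--         for i in _CELL_TRIPLES.get(m, ()):
--             counts[i] += 1
--     return any(c == 3 for c in counts)
-- ===== Notes on version B (the rewrite author's own statement) =====
-- stated objective: faster
-- what changed: Replaces the 8 nested scans of the movement list (one per winning triple) by a single pass over the movements that tallies per-triple counters via a precomputed cell-to-triples map, then checks any counter == 3.
import Mathlib
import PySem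

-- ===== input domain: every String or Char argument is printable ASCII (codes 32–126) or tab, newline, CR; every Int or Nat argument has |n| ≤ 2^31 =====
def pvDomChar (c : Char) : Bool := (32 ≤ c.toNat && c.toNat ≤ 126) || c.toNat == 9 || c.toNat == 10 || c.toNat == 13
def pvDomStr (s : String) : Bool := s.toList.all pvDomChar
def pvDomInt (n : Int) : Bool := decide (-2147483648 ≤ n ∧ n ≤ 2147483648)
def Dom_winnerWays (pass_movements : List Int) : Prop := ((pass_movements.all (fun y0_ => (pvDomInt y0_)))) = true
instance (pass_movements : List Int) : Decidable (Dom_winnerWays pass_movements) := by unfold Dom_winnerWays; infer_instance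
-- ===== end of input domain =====

set_option maxHeartbeats 1000000


-- B replaces A's 8 scans of the movement list (one per winning triple) by one pass over the
-- movements tallying per-triple counters via a precomputed cell→triples map (alternative decomposition).

-- ===== PORT A =====
def winPosA : List (Int × Int × Int) :=
  [(1,2,3), (4,5,6), (7,8,9), (1,4,7), (2,5,8), (3,6,9), (1,5,9), (3,5,7)]

-- A's outer loop with early return: try each winning triple in order
def winnerWaysGo (pass_movements : List Int) : List (Int × Int × Int) → Bool
  | [] => false
  | s :: rest =>
    let count := pass_movements.foldl
      (fun c m => if m = s.1 ∨ m = s.2.1 ∨ m = s.2.2 then c + 1 else c) (0 : Nat)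
    if count = 3 then true else winnerWaysGo pass_movements rest

def winnerWays (pass_movements : List Int) : Bool :=
  winnerWaysGo pass_movements winPosA

-- ===== PORT B =====
-- the precomputed dict _CELL_TRIPLES, with .get(m, ()) defaulting to []
def cellTriples (m : Int) : List Nat :=
  if m = 1 then [0,3,6] else if m = 2 then [0,4] else if m = 3 then [0,5,7]
  else if m = 4 then [1,3] else if m = 5 then [1,4,6,7] else if m = 6 then [1,5]
  else if m = 7 then [2,3,7] else if m = 8 then [2,4] else if m = 9 then [2,5,6]
  else []

-- counts[i] += 1
def bumpAt (counts : List Nat) (i : Nat) : List Nat :=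
  counts.set i (counts.getD i 0 + 1)

def winnerWays_alt (pass_movements : List Int) : Bool :=
  let counts := pass_movements.foldl
    (fun cs m => (cellTriples m).foldl bumpAt cs) (List.replicate 8 0)
  counts.any (· == 3)

-- ===== PRECONDITION & SPEC =====
def Spec_winnerWays (pass_movements : List Int) (out : Bool) : Prop := out = winnerWays_alt pass_movements
instance (pass_movements : List Int) (out : Bool) : Decidable (Spec_winnerWays pass_movements out) := by unfold Spec_winnerWays; infer_instance

-- ===== CLAIM (what is proved, stated in full; the proofs are below) =====
def Claim_equal_winnerWays : Prop := ∀ (pass_movements : List Int), Dom_winnerWays pass_movements → Spec_winnerWays pass_movements (winnerWays pass_movements)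

-- ===== LEMMAS AND PROOFS =====

-- membership indicator: 1 if movement m belongs to the winning triple numbered i
def hitInd (i : Nat) (m : Int) : Nat :=
  if i ∈ cellTriples m then 1 else 0

-- one movement step of B's fold on an explicit 8-element state
theorem bump_step (c0 c1 c2 c3 c4 c5 c6 c7 : Nat) (m : Int) :
    (cellTriples m).foldl bumpAt [c0,c1,c2,c3,c4,c5,c6,c7]
      = [c0 + hitInd 0 m, c1 + hitInd 1 m, c2 + hitInd 2 m, c3 + hitInd 3 m,
         c4 + hitInd 4 m, c5 + hitInd 5 m, c6 + hitInd 6 m, c7 + hitInd 7 m] := by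
  unfold cellTriples
  split_ifs with h1 h2 h3 h4 h5 h6 h7 h8 h9 <;>
    subst_vars <;>
    simp [List.foldl, bumpAt, hitInd, cellTriples, List.set, List.getD, *]

-- per-triple count of a movement list
def cnt (i : Nat) (pm : List Int) : Nat := pm.foldl (fun c m => c + hitInd i m) 0

theorem cnt_cons (i : Nat) (m : Int) (pm : List Int) :
    cnt i (m :: pm) = hitInd i m + cnt i pm := by
  have key : ∀ (l : List Int) (a b : Nat),
      l.foldl (fun c m => c + hitInd i m) (a + b) = a + l.foldl (fun c m => c + hitInd i m) b := by
    intro l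
    induction l with
    | nil => intro a b; rfl
    | cons x xs ih =>
      intro a b
      simp only [List.foldl]
      rw [Nat.add_assoc, ih]
  simpa [cnt, Nat.add_comm] using key pm (hitInd i m) 0

-- B's whole fold on an explicit 8-element state
theorem fold_counts (pm : List Int) :
    ∀ (c0 c1 c2 c3 c4 c5 c6 c7 : Nat),
    pm.foldl (fun cs m => (cellTriples m).foldl bumpAt cs) [c0,c1,c2,c3,c4,c5,c6,c7]
      = [c0 + cnt 0 pm, c1 + cnt 1 pm, c2 + cnt 2 pm, c3 + cnt 3 pm,
         c4 + cnt 4 pm, c5 + cnt 5 pm, c6 + cnt 6 pm, c7 + cnt 7 pm] := by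
  induction pm with
  | nil => intro c0 c1 c2 c3 c4 c5 c6 c7; simp [cnt]
  | cons m pm ih =>
    intro c0 c1 c2 c3 c4 c5 c6 c7
    simp only [List.foldl, bump_step, ih, cnt_cons]
    simp only [List.cons.injEq, and_true]
    omega

-- A's inner count for triple i equals cnt i (the condition lists the same cells as cellTriples)
theorem a_count (i : Nat) (a b c : Int)
    (h : ∀ m : Int, (m = a ∨ m = b ∨ m = c) ↔ i ∈ cellTriples m) (pm : List Int) :
    pm.foldl (fun c' m => if m = a ∨ m = b ∨ m = c then c' + 1 else c') 0 = cnt i pm := by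
  have : ∀ (l : List Int) (n : Nat),
      l.foldl (fun c' m => if m = a ∨ m = b ∨ m = c then c' + 1 else c') n
        = l.foldl (fun c' m => c' + hitInd i m) n := by
    intro l
    induction l with
    | nil => intro n; rfl
    | cons x xs ih =>
      intro n
      simp only [List.foldl]
      by_cases hx : x = a ∨ x = b ∨ x = c
      · have h1 : hitInd i x = 1 := by simp [hitInd, (h x).mp hx]
        rw [if_pos hx, ih, h1]
      · have h0 : hitInd i x = 0 := by simp [hitInd]; exact fun hm => hx ((h x).mpr hm)
        rw [if_neg hx, ih, h0, Nat.add_zero]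
  exact this pm 0

theorem cond0 : ∀ m : Int, (m = 1 ∨ m = 2 ∨ m = 3) ↔ (0 : Nat) ∈ cellTriples m := by
  intro m; unfold cellTriples; split_ifs <;> simp_all
theorem cond1 : ∀ m : Int, (m = 4 ∨ m = 5 ∨ m = 6) ↔ (1 : Nat) ∈ cellTriples m := by
  intro m; unfold cellTriples; split_ifs <;> simp_all
theorem cond2 : ∀ m : Int, (m = 7 ∨ m = 8 ∨ m = 9) ↔ (2 : Nat) ∈ cellTriples m := by
  intro m; unfold cellTriples; split_ifs <;> simp_all
theorem cond3 : ∀ m : Int, (m = 1 ∨ m = 4 ∨ m = 7) ↔ (3 : Nat) ∈ cellTriples m := by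
  intro m; unfold cellTriples; split_ifs <;> simp_all
theorem cond4 : ∀ m : Int, (m = 2 ∨ m = 5 ∨ m = 8) ↔ (4 : Nat) ∈ cellTriples m := by
  intro m; unfold cellTriples; split_ifs <;> simp_all
theorem cond5 : ∀ m : Int, (m = 3 ∨ m = 6 ∨ m = 9) ↔ (5 : Nat) ∈ cellTriples m := by
  intro m; unfold cellTriples; split_ifs <;> simp_all
theorem cond6 : ∀ m : Int, (m = 1 ∨ m = 5 ∨ m = 9) ↔ (6 : Nat) ∈ cellTriples m := by
  intro m; unfold cellTriples; split_ifs <;> simp_all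
theorem cond7 : ∀ m : Int, (m = 3 ∨ m = 5 ∨ m = 7) ↔ (7 : Nat) ∈ cellTriples m := by
  intro m; unfold cellTriples; split_ifs <;> simp_all

-- ===== VERDICT (by name: the statement is the Claim_ definition above) =====
theorem winnerWays_spec : Claim_equal_winnerWays := by
  intro pm _
  unfold Spec_winnerWays winnerWays winnerWays_alt winPosA
  show winnerWaysGo pm _ = _
  simp only [winnerWaysGo, List.replicate]
  rw [a_count 0 1 2 3 cond0 pm, a_count 1 4 5 6 cond1 pm, a_count 2 7 8 9 cond2 pm,
      a_count 3 1 4 7 cond3 pm, a_count 4 2 5 8 cond4 pm, a_count 5 3 6 9 cond5 pm,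
      a_count 6 1 5 9 cond6 pm, a_count 7 3 5 7 cond7 pm, fold_counts pm]
  simp only [List.any, Nat.zero_add]
  split_ifs <;> simp_all
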